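-- pv_equiv track=rewrite | github.com/poidl/slidenc | pyomReader.py | get_bool
-- ===== SOURCE A (Python) =====
-- def get_bool(dn): #dn: list of dim_names
--     l=[['Time'], #l: aequivalent dims
--        ['zt','zu'],
--        ['yt','yu'],
--        ['xt','xu']]
--     bo=[False]*len(l);
--     for string in dn:
--         for ii in range(len(bo)):
--             if string in l[ii]:
--                 bo[ii]=True
--     return bo
-- ===== SOURCE B (Python) =====
-- def get_bool(dn):
--     names = set(dn)
--     groups = (('Time',), ('zt', 'zu'), ('yt', 'yu'), ('xt', 'xu'))
--     return [not names.isdisjoint(g) for g in groups]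
-- ===== Notes on version B (the rewrite author's own statement) =====
-- stated objective: idiomatic
-- what changed: Inverts the traversal: instead of mutating a flag array once per name with an inner scan over the four groups, B builds set(dn) once and maps over the groups, returning [not set(dn).isdisjoint(g) for g in groups].
import Mathlib
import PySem

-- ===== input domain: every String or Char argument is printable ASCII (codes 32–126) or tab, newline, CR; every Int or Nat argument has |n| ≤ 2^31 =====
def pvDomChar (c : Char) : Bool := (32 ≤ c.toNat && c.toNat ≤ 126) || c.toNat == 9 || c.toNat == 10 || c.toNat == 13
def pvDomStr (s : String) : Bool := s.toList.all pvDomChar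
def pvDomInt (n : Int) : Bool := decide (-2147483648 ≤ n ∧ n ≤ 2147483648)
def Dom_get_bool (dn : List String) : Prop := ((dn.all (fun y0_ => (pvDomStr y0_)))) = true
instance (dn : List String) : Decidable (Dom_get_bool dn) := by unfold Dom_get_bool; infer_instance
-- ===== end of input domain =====

-- B inverts A's traversal: instead of mutating a flag array per name, it builds set(dn)
-- once and maps over the four dim groups, emitting 'not disjoint' per group (idiomatic).


-- ===== PORT A =====
def get_bool (dn : List String) : List Bool :=
  let l : List (List String) := [["Time"], ["zt", "zu"], ["yt", "yu"], ["xt", "xu"]]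
  let bo : List Bool := List.replicate l.length false
  dn.foldl (fun bo s =>
    (List.range bo.length).foldl (fun bo ii =>
      if s ∈ l.getD ii [] then bo.set ii true else bo) bo) bo

-- ===== PORT B =====
def get_bool_alt (dn : List String) : List Bool :=
  let names : PySem.Set String := PySem.Set.ofList dn
  ([["Time"], ["zt", "zu"], ["yt", "yu"], ["xt", "xu"]] : List (List String)).map
    (fun g => ! PySem.Set.isdisjoint names g)

-- ===== PRECONDITION & SPEC =====
def Spec_get_bool (dn : List String) (out : List Bool) : Prop := out = get_bool_alt dn
instance (dn : List String) (out : List Bool) : Decidable (Spec_get_bool dn out) := by unfold Spec_get_bool; infer_instance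

-- ===== CLAIM =====
def Claim_equal_get_bool : Prop := ∀ (dn : List String), Dom_get_bool dn → Spec_get_bool dn (get_bool dn)

-- ===== LEMMAS AND PROOFS =====
-- A's per-name update of bo (the inner loop over the four groups).
def pvStepA (s : String) (bo : List Bool) : List Bool :=
  (List.range bo.length).foldl (fun bo ii =>
    if s ∈ ([["Time"], ["zt", "zu"], ["yt", "yu"], ["xt", "xu"]] : List (List String)).getD ii [] then bo.set ii true else bo) bo

lemma pvStepA_eq (s : String) (a b c d : Bool) :
    pvStepA s [a, b, c, d]
      = [a || decide ("Time" = s), b || (decide ("zt" = s) || decide ("zu" = s)),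
         c || (decide ("yt" = s) || decide ("yu" = s)),
         d || (decide ("xt" = s) || decide ("xu" = s))] := by
  simp only [pvStepA]
  by_cases h0 : "Time" = s <;> by_cases h1 : "zt" = s <;> by_cases h2 : "zu" = s <;>
    by_cases h3 : "yt" = s <;> by_cases h4 : "yu" = s <;> by_cases h5 : "xt" = s <;>
    by_cases h6 : "xu" = s <;>
    simp_all [List.range_succ, eq_comm]

-- Bool OR shuffle used when pushing one element through the fold.
lemma pvOrAC (a x y u v : Bool) : (a || (x || y) || (u || v)) = (a || (x || u || (y || v))) := by
  cases a <;> cases x <;> cases y <;> cases u <;> cases v <;> rfl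

-- A's outer fold, characterised from any 4-element start.
lemma pvLoopA (dn : List String) (a b c d : Bool) :
    dn.foldl (fun bo s => pvStepA s bo) [a, b, c, d]
      = [a || decide ("Time" ∈ dn), b || (decide ("zt" ∈ dn) || decide ("zu" ∈ dn)),
         c || (decide ("yt" ∈ dn) || decide ("yu" ∈ dn)),
         d || (decide ("xt" ∈ dn) || decide ("xu" ∈ dn))] := by
  induction dn generalizing a b c d with
  | nil => simp
  | cons s t ih =>
    simp only [List.foldl_cons, pvStepA_eq, ih, List.mem_cons, Bool.decide_or, List.cons.injEq,
      and_true]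
    exact ⟨Bool.or_assoc .., pvOrAC .., pvOrAC .., pvOrAC ..⟩

-- B's per-group test equals plain membership in dn.
lemma pvDisjB (dn g : List String) :
    (! PySem.Set.isdisjoint (PySem.Set.ofList dn) g) = g.any (fun x => decide (x ∈ dn)) := by
  rcases h : PySem.Set.isdisjoint (PySem.Set.ofList dn) g with _ | _
  · simp only [Bool.not_false]
    have := (not_iff_not.mpr (PySem.Set.isdisjoint_iff (PySem.Set.ofList dn) g)).mp
      (by simp [h])
    push Not at this
    obtain ⟨x, hx, hg⟩ := this
    rw [PySem.Set.mem_ofList] at hx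
    symm
    simp only [List.any_eq_true, decide_eq_true_eq]
    exact ⟨x, hg, hx⟩
  · simp only [Bool.not_true]
    have := (PySem.Set.isdisjoint_iff (PySem.Set.ofList dn) g).mp h
    symm
    simp only [List.any_eq_false, decide_eq_true_eq]
    intro x hxg hxdn
    refine this x ?_ hxg
    rw [PySem.Set.mem_ofList]
    exact hxdn

-- ===== VERDICT =====
theorem get_bool_spec : Claim_equal_get_bool := by
  intro dn _
  show get_bool dn = get_bool_alt dn
  have hA : get_bool dn
      = [decide ("Time" ∈ dn), decide ("zt" ∈ dn ∨ "zu" ∈ dn),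
         decide ("yt" ∈ dn ∨ "yu" ∈ dn), decide ("xt" ∈ dn ∨ "xu" ∈ dn)] := by
    have h := pvLoopA dn false false false false
    simpa [get_bool, pvStepA] using h
  rw [hA]
  simp [get_bool_alt, pvDisjB, Bool.decide_or]
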